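-- pv_equiv track=rewrite | github.com/E-delweiss/Cul_de_Chouette | CDC_code/CDC_regles.py | la_soufflette
-- ===== SOURCE A (Python) =====
-- from itertools import permutations
--
-- def la_soufflette(dico_dice):
--     """
--     Déterminer si la règle de "La Soufflette" est applicable.
--
--     input : dictionnaire contenant le nom des dés et leur valeur
--     output : True /False
--
--
--     Parameters
--     ----------
--     dico_dice : dict
--         Dictionnaire contenant le nom des dés et leur valeur.
--
--     Returns
--     -------
--     state : bool
--         Indique si la combinaison a lieu ou non.
--
--     """
--     chouette_1 = dico_dice['chouette_1']
--     chouette_2 = dico_dice['chouette_2']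
--     cul        = dico_dice['cul']
--
--     tuple_dice = (chouette_1,chouette_2,cul)
--     liste_comb = []
--     SOUFFLETTE = [4,2,1]
--     for i in permutations(SOUFFLETTE,3):
--         liste_comb.append(i)
--
--     if tuple_dice in liste_comb:
--         return True
--     else:
--         return False
-- ===== SOURCE B (Python) =====
-- def la_soufflette(dico_dice):
--     chouette_1 = dico_dice['chouette_1']
--     chouette_2 = dico_dice['chouette_2']
--     cul        = dico_dice['cul']
--     return sorted((chouette_1, chouette_2, cul)) == [1, 2, 4]
-- ===== Notes on version B (the rewrite author's own statement) =====
-- stated objective: simpler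
-- what changed: B canonicalizes the three dice by sorting and compares against [1,2,4] instead of enumerating all 6 permutations of (4,2,1) into a list and testing tuple membership.
import Mathlib
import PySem

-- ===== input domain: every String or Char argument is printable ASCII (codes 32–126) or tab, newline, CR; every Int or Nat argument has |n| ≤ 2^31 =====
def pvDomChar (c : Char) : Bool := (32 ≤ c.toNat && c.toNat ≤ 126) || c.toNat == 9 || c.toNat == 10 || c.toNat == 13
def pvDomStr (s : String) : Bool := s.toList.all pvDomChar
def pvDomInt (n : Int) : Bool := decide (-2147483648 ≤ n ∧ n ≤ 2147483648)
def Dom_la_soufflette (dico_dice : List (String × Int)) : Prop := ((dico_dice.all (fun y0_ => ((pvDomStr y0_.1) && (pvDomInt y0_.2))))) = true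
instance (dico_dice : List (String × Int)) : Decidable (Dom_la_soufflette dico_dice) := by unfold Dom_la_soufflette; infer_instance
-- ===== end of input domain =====

-- B replaces A's enumeration of the 6 permutations of (4,2,1) and membership test
-- by sorting the three dice and comparing with the canonical [1,2,4] (objective: simpler).

-- ===== PORT A =====
-- dict[key] access (first match; string equality compared char-by-char, kernel-reducible)
def pyLookup (k : String) : List (String × Int) → Option Int
  | [] => none
  | (k', v) :: rest => if k'.toList == k.toList then some v else pyLookup k rest

def la_soufflette (dico_dice : List (String × Int)) : Bool :=
  match pyLookup "chouette_1" dico_dice, pyLookup "chouette_2" dico_dice, pyLookup "cul" dico_dice with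
  | some chouette_1, some chouette_2, some cul =>
      let tuple_dice : List Int := [chouette_1, chouette_2, cul]
      let liste_comb : List (List Int) :=
        (PySem.List.permutations ([4, 2, 1] : List Int) 3).foldl (fun acc i => acc ++ [i]) []
      if tuple_dice ∈ liste_comb then true else false
  | _, _, _ => false  -- Python raises KeyError here; excluded by Pre_

-- ===== PORT B =====
def la_soufflette_alt (dico_dice : List (String × Int)) : Bool :=
  match pyLookup "chouette_1" dico_dice with
  | none => false  -- Python raises KeyError here; excluded by Pre_
  | some chouette_1 =>
    match pyLookup "chouette_2" dico_dice with
    | none => false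
    | some chouette_2 =>
      match pyLookup "cul" dico_dice with
      | none => false
      | some cul =>
        PySem.List.sorted [chouette_1, chouette_2, cul] (fun x => x) false == [1, 2, 4]

-- ===== PRECONDITION & SPEC =====
-- Pre_ excludes exactly the dicts missing one of the three keys, on which Python A raises KeyError.
def Pre_la_soufflette (dico_dice : List (String × Int)) : Prop :=
  (pyLookup "chouette_1" dico_dice).isSome ∧ (pyLookup "chouette_2" dico_dice).isSome ∧
    (pyLookup "cul" dico_dice).isSome
instance (dico_dice : List (String × Int)) : Decidable (Pre_la_soufflette dico_dice) := by
  unfold Pre_la_soufflette; infer_instance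

def pvWitness_la_soufflette : (List (String × Int)) :=
  [("chouette_1", 4), ("chouette_2", 2), ("cul", 1)]

def Spec_la_soufflette (dico_dice : List (String × Int)) (out : Bool) : Prop := out = la_soufflette_alt dico_dice
instance (dico_dice : List (String × Int)) (out : Bool) : Decidable (Spec_la_soufflette dico_dice out) := by unfold Spec_la_soufflette; infer_instance

-- ===== CLAIM (what is proved, stated in full; the proofs are below) =====
def Claim_equal_la_soufflette : Prop := ∀ (dico_dice : List (String × Int)), Dom_la_soufflette dico_dice → Pre_la_soufflette dico_dice → Spec_la_soufflette dico_dice (la_soufflette dico_dice)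

-- ===== LEMMAS AND PROOFS =====

-- A's permutation list, evaluated.
theorem perms_421 :
    (PySem.List.permutations ([4, 2, 1] : List Int) 3).foldl (fun acc i => acc ++ [i]) [] =
      [[4, 2, 1], [4, 1, 2], [2, 4, 1], [2, 1, 4], [1, 4, 2], [1, 2, 4]] := by decide

theorem mem_perms_iff (a b c : Int) :
    [a, b, c] ∈ ([[4, 2, 1], [4, 1, 2], [2, 4, 1], [2, 1, 4], [1, 4, 2], [1, 2, 4]] : List (List Int))
      ↔ [a, b, c].Perm [1, 2, 4] := by
  constructor
  · intro h
    simp only [List.mem_cons, List.not_mem_nil, or_false, List.cons.injEq, and_true] at h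
    rcases h with ⟨rfl, rfl, rfl⟩ | ⟨rfl, rfl, rfl⟩ | ⟨rfl, rfl, rfl⟩ | ⟨rfl, rfl, rfl⟩ |
      ⟨rfl, rfl, rfl⟩ | ⟨rfl, rfl, rfl⟩ <;> decide
  · intro h
    have ha : a ∈ ([1, 2, 4] : List Int) := h.subset (by simp)
    have hb : b ∈ ([1, 2, 4] : List Int) := h.subset (by simp)
    have hc : c ∈ ([1, 2, 4] : List Int) := h.subset (by simp)
    simp only [List.mem_cons, List.not_mem_nil, or_false] at ha hb hc
    rcases ha with rfl | rfl | rfl <;> rcases hb with rfl | rfl | rfl <;>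
      rcases hc with rfl | rfl | rfl <;> revert h <;> decide

theorem sorted_eq_iff (a b c : Int) :
    PySem.List.sorted [a, b, c] (fun x => x) false = [1, 2, 4] ↔ [a, b, c].Perm [1, 2, 4] := by
  constructor
  · intro h
    have hp := PySem.List.sorted_perm [a, b, c] (fun x : Int => x) false
    rw [h] at hp
    exact hp.symm
  · intro h
    exact PySem.List.sorted_eq_of_perm_of_pairwise_lt [a, b, c] [1, 2, 4] (fun x => x) h.symm (by decide)

theorem la_soufflette_spec : Claim_equal_la_soufflette := by
  intro d _ _
  unfold Spec_la_soufflette la_soufflette la_soufflette_alt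
  cases pyLookup "chouette_1" d <;> cases pyLookup "chouette_2" d <;> cases pyLookup "cul" d <;>
    simp only []
  case some.some.some a b c =>
    rw [perms_421]
    by_cases hm : ([a, b, c] : List Int).Perm [1, 2, 4]
    · rw [if_pos ((mem_perms_iff a b c).mpr hm)]
      exact (beq_iff_eq.mpr ((sorted_eq_iff a b c).mpr hm)).symm
    · rw [if_neg (fun h => hm ((mem_perms_iff a b c).mp h))]
      exact (beq_eq_false_iff_ne.mpr (fun h => hm ((sorted_eq_iff a b c).mp h))).symm
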